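-- pv_equiv track=rewrite | github.com/asweigart/scrollart | python/diamondsky.py | get_filled_diamond
-- ===== SOURCE A (Python) =====
-- def get_filled_diamond(size):
--     assert size > 0
--     rows = []
--     # Make the top half of the diamond:
--     for i in range(size):
--         rows.append(([None] * (size - i - 1)) + (['/'] * (i + 1)) + (['\\'] * (i + 1)))
--
--     # Make the bottom half of the diamond:
--     for i in range(size):
--         rows.append(([None] * i) + (['\\'] * (size - i)) + (['/'] * (size - i)))
--     return rows
-- ===== SOURCE B (Python) =====
-- def get_filled_diamond(size):
--     assert size > 0
--     rows = []
--     # One pass over all 2*size row indices; each cell chosen by comparing its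
--     # column index to the row's two segment boundaries.
--     for r in range(2 * size):
--         if r < size:
--             lead, total, first, second = size - r - 1, size + r + 1, '/', '\\'
--         else:
--             i = r - size
--             lead, total, first, second = i, 2 * size - i, '\\', '/'
--         row = []
--         for c in range(total):
--             if c < lead:
--                 row.append(None)
--             elif c < size:
--                 row.append(first)
--             else:
--                 row.append(second)
--         rows.append(row)
--     return rows
-- ===== Notes on version B (the rewrite author's own statement) =====
-- stated objective: alternative
-- what changed: Instead of concatenating three pre-built replicated segments per row in two separate half-loops, B runs a single loop over all row indices of both halves and fills each row cell-by-cell, choosing None or a slash character by comparing the column index with the row's segment boundaries.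
import Mathlib
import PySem

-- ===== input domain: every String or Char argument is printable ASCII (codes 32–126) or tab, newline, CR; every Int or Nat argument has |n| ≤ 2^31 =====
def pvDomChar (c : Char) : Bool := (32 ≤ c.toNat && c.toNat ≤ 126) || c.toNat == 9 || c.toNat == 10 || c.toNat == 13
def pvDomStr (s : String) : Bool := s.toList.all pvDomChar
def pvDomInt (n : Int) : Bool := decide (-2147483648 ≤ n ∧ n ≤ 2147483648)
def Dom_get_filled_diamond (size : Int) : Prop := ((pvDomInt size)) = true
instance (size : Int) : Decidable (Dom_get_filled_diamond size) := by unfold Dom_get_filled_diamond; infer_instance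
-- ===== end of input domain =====

-- B builds each row cell-by-cell from column/boundary comparisons
-- instead of concatenating replicated segments in two half-loops (objective: alternative).

-- ===== PORT A =====
def get_filled_diamond (size : Int) : List (List (Option String)) :=
  -- top half loop, then bottom half loop, each appending one row per i
  ((PySem.List.pyRange 0 size 1).map (fun i =>
      List.replicate (size - i - 1).toNat (none : Option String)
        ++ List.replicate (i + 1).toNat (some "/")
        ++ List.replicate (i + 1).toNat (some "\\")))
    ++ ((PySem.List.pyRange 0 size 1).map (fun i =>
      List.replicate i.toNat (none : Option String)
        ++ List.replicate (size - i).toNat (some "\\")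
        ++ List.replicate (size - i).toNat (some "/")))

-- ===== PORT B =====
def get_filled_diamond_alt (size : Int) : List (List (Option String)) :=
  (PySem.List.pyRange 0 (2 * size) 1).map (fun r =>
    let p : Int × Int × String × String :=
      if r < size then (size - r - 1, size + r + 1, "/", "\\")
      else (r - size, 2 * size - (r - size), "\\", "/")
    (PySem.List.pyRange 0 p.2.1 1).map (fun c =>
      if c < p.1 then (none : Option String)
      else if c < size then some p.2.2.1
      else some p.2.2.2))

-- ===== PRECONDITION & SPEC =====
-- Pre_: the assert at the top of both Pythons raises AssertionError unless size > 0.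
def Pre_get_filled_diamond (size : Int) : Prop := 0 < size
instance (size : Int) : Decidable (Pre_get_filled_diamond size) := by unfold Pre_get_filled_diamond; infer_instance
def pvWitness_get_filled_diamond : Int := 3

def Spec_get_filled_diamond (size : Int) (out : List (List (Option String))) : Prop := out = get_filled_diamond_alt size
instance (size : Int) (out : List (List (Option String))) : Decidable (Spec_get_filled_diamond size out) := by unfold Spec_get_filled_diamond; infer_instance

-- ===== CLAIM (what is proved, stated in full; the proofs are below) =====
def Claim_equal_get_filled_diamond : Prop := ∀ (size : Int), Dom_get_filled_diamond size → Pre_get_filled_diamond size → Spec_get_filled_diamond size (get_filled_diamond size)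

-- ===== LEMMAS AND PROOFS =====

-- a range mapped through a constant-on-the-range function is a replicate
theorem pv_map_const_range {α : Type} (a b : Int) (f : Int → α) (x : α)
    (h : ∀ c, a ≤ c → c < b → f c = x) :
    (PySem.List.pyRange a b 1).map f = List.replicate (b - a).toNat x := by
  have h1 : (PySem.List.pyRange a b 1).map f
      = (PySem.List.pyRange a b 1).map (fun _ => x) := by
    apply List.map_congr_left
    intro c hc
    rw [PySem.List.mem_pyRange_one] at hc
    exact h c hc.1 hc.2
  rw [h1, List.map_const', PySem.List.length_pyRange_one]

-- the cell-by-cell row with boundaries a ≤ b ≤ t equals three replicates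
theorem pv_row_eq (a b t : Int) (y z : Option String)
    (h0 : 0 ≤ a) (hab : a ≤ b) (hbt : b ≤ t) :
    (PySem.List.pyRange 0 t 1).map (fun c =>
        if c < a then (none : Option String) else if c < b then y else z)
      = List.replicate a.toNat none ++ List.replicate (b - a).toNat y
          ++ List.replicate (t - b).toNat z := by
  rw [PySem.List.pyRange_one_append 0 a t h0 (le_trans hab hbt),
      PySem.List.pyRange_one_append a b t hab hbt, List.map_append, List.map_append,
      ← List.append_assoc]
  have e1 := pv_map_const_range 0 a
      (fun c => if c < a then (none : Option String) else if c < b then y else z) none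
      (fun c hc1 hc2 => by simp [hc2])
  have e2 := pv_map_const_range a b
      (fun c => if c < a then (none : Option String) else if c < b then y else z) y
      (fun c hc1 hc2 => by
        have h1 : ¬ c < a := not_lt.mpr hc1
        simp [h1, hc2])
  have e3 := pv_map_const_range b t
      (fun c => if c < a then (none : Option String) else if c < b then y else z) z
      (fun c hc1 hc2 => by
        have h1 : ¬ c < a := not_lt.mpr (le_trans hab hc1)
        have h2 : ¬ c < b := not_lt.mpr hc1
        simp [h1, h2])
  rw [e1, e2, e3]
  norm_num

theorem get_filled_diamond_spec : Claim_equal_get_filled_diamond := by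
  intro size _ hpos
  have hp : 0 < size := hpos
  unfold Spec_get_filled_diamond get_filled_diamond get_filled_diamond_alt
  rw [PySem.List.pyRange_one_append 0 size (2 * size) (le_of_lt hp) (by omega),
      List.map_append]
  congr 1
  · -- top half: every r in the first range has r < size
    apply List.map_congr_left
    intro r hr
    rw [PySem.List.mem_pyRange_one] at hr
    have hlt : r < size := hr.2
    simp only [hlt, if_pos]
    have h := pv_row_eq (size - r - 1) size (size + r + 1) (some "/") (some "\\")
      (by omega) (by omega) (by omega)
    have e1 : size - (size - r - 1) = r + 1 := by omega
    have e2 : size + r + 1 - size = r + 1 := by omega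
    rw [e1, e2] at h
    exact h.symm
  · -- bottom half: reindex r = size + i, then r < size never holds
    rw [show PySem.List.pyRange size (2 * size) 1
          = (PySem.List.pyRange 0 size 1).map (fun i => size + i) by
        rw [PySem.List.pyRange_one 0 size, PySem.List.pyRange_one size (2 * size), List.map_map]
        have e : 2 * size - size = size - 0 := by omega
        rw [e]
        apply List.map_congr_left
        intro k _
        simp [Function.comp],
      List.map_map]
    apply List.map_congr_left
    intro i hi
    rw [PySem.List.mem_pyRange_one] at hi
    have hnlt : ¬ (size + i < size) := by omega
    simp only [Function.comp, hnlt, if_false]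
    have e0 : size + i - size = i := by omega
    rw [e0]
    have h := pv_row_eq i size (2 * size - i) (some "\\") (some "/")
      hi.1 (by omega) (by omega)
    have e1 : 2 * size - i - size = size - i := by omega
    rw [e1] at h
    exact h.symm
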